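-- pv_equiv track=rewrite | github.com/LucioRuizDiaz/IP-Algo-I | parciales/Python/Parcial Comision D 1c2024/parcial_comisionD_1c2024_mateo.py | tupla_con_maximo_segundo_elemento
-- ===== SOURCE A (Python) =====
-- def segundo_elemento(tupla:list):
--     return tupla[1]
--
-- def tupla_con_maximo_segundo_elemento(lista:list[tuple])->tuple:
--     ind: int
--     aux: int = 0
--     for ind in range(len(lista)-1):
--         if segundo_elemento(lista[aux]) <= segundo_elemento(lista[ind+1]):
--             aux = ind + 1
--     res = lista[aux]
--     return res
-- ===== SOURCE B (Python) =====
-- def tupla_con_maximo_segundo_elemento(lista: list) -> tuple: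
--     # Stable sort by second element; the last element of the sorted list is the
--     # last-occurring tuple with the maximal second element (matching A's <= tie-break).
--     return sorted(lista, key=lambda t: t[1])[-1]
-- ===== Notes on version B (the rewrite author's own statement) =====
-- stated objective: simpler
-- what changed: Replaces the explicit index-tracking running-max loop with a stable sort by second element followed by picking the last element; stability preserves A's last-wins tie-break.
import Mathlib
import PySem

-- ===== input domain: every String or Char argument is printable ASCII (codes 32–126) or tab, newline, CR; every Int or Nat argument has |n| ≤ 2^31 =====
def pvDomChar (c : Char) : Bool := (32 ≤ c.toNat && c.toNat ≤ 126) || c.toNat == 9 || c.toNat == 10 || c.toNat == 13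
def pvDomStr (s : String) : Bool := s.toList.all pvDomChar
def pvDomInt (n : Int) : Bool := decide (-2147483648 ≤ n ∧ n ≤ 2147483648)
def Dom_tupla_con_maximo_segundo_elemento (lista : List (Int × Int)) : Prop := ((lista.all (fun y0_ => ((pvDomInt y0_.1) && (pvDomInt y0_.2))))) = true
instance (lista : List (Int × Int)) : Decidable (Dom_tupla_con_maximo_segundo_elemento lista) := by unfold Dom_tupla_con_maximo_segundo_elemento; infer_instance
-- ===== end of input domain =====

-- B replaces A's index-tracking running-max loop by a stable sort on the second
-- component followed by taking the last element (objective: simpler).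

-- ===== PORT A =====
def segundo_elemento (tupla : Int × Int) : Int := tupla.2

def tupla_con_maximo_segundo_elemento (lista : List (Int × Int)) : Int × Int :=
  -- aux starts at 0; for ind in range(len(lista)-1): update aux.
  -- lista[...] is ported as pyGetD (total form); every access is in range on Pre_ (lista ≠ []).
  let aux : Int :=
    (PySem.List.pyRange 0 (PySem.List.len lista - 1) 1).foldl
      (fun aux ind =>
        if segundo_elemento (PySem.List.pyGetD lista aux (0, 0)) ≤
            segundo_elemento (PySem.List.pyGetD lista (ind + 1) (0, 0)) then ind + 1 else aux) 0
  PySem.List.pyGetD lista aux (0, 0)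

-- ===== PORT B =====
def tupla_con_maximo_segundo_elemento_alt (lista : List (Int × Int)) : Int × Int :=
  -- sorted(lista, key=lambda t: t[1])[-1]; [-1] ported as pyGetD … (-1), in range on Pre_.
  PySem.List.pyGetD (PySem.List.sorted lista (fun t => t.2) false) (-1) (0, 0)

-- ===== PRECONDITION & SPEC =====
-- A raises IndexError on the empty list (lista[0]); B's [-1] raises there too.
def Pre_tupla_con_maximo_segundo_elemento (lista : List (Int × Int)) : Prop := lista ≠ []
instance (lista : List (Int × Int)) : Decidable (Pre_tupla_con_maximo_segundo_elemento lista) := by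
  unfold Pre_tupla_con_maximo_segundo_elemento; infer_instance
def pvWitness_tupla_con_maximo_segundo_elemento : (List (Int × Int)) := [(1, 2)]

def Spec_tupla_con_maximo_segundo_elemento (lista : List (Int × Int)) (out : Int × Int) : Prop := out = tupla_con_maximo_segundo_elemento_alt lista
instance (lista : List (Int × Int)) (out : Int × Int) : Decidable (Spec_tupla_con_maximo_segundo_elemento lista out) := by unfold Spec_tupla_con_maximo_segundo_elemento; infer_instance

-- ===== CLAIM (what is proved, stated in full; the proofs are below) =====
def Claim_equal_tupla_con_maximo_segundo_elemento : Prop := ∀ (lista : List (Int × Int)), Dom_tupla_con_maximo_segundo_elemento lista → Pre_tupla_con_maximo_segundo_elemento lista → Spec_tupla_con_maximo_segundo_elemento lista (tupla_con_maximo_segundo_elemento lista)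

-- ===== LEMMAS AND PROOFS =====

-- The common value both programs compute: last-wins running max by second component.
def runMax (h : Int × Int) (t : List (Int × Int)) : Int × Int :=
  t.foldl (fun m x => if m.2 ≤ x.2 then x else m) h

-- head ≤ last (by second component) in a pairwise-sorted list
lemma head_le_getLast? (y l : Int × Int) (t : List (Int × Int))
    (hp : (y :: t).Pairwise (fun a b => a.2 ≤ b.2)) (hl : (y :: t).getLast? = some l) :
    y.2 ≤ l.2 := by
  induction t generalizing y with
  | nil => simp at hl; subst hl; exact le_refl _
  | cons z t ih =>
      rw [List.pairwise_cons] at hp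
      rw [List.getLast?_cons_cons] at hl
      exact le_trans (hp.1 z (by simp)) (ih z hp.2 hl)

lemma insertBy_ne_nil (x : Int × Int) (acc : List (Int × Int)) :
    PySem.List.insertBy (fun a b => decide (a.2 < b.2)) x acc ≠ [] := by
  cases acc with
  | nil => simp [PySem.List.insertBy]
  | cons y ys => simp only [PySem.List.insertBy]; split <;> simp

lemma pairwise_insertBy (x : Int × Int) (acc : List (Int × Int))
    (hp : acc.Pairwise (fun a b => a.2 ≤ b.2)) :
    (PySem.List.insertBy (fun a b => decide (a.2 < b.2)) x acc).Pairwise (fun a b => a.2 ≤ b.2) := by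
  induction acc with
  | nil => simp [PySem.List.insertBy]
  | cons y ys ih =>
      rw [List.pairwise_cons] at hp
      simp only [PySem.List.insertBy]
      split
      · rename_i hlt
        rw [decide_eq_true_iff] at hlt
        refine List.Pairwise.cons ?_ (List.Pairwise.cons hp.1 hp.2)
        intro z hz
        rcases List.mem_cons.mp hz with rfl | hz'
        · exact le_of_lt hlt
        · exact le_trans (le_of_lt hlt) (hp.1 z hz')
      · rename_i hge
        rw [decide_eq_true_iff] at hge
        rw [not_lt] at hge
        refine List.Pairwise.cons ?_ (ih hp.2)
        intro z hz
        rcases (PySem.List.mem_insertBy _ x z ys).mp hz with rfl | hz'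
        · exact hge
        · exact hp.1 z hz'

lemma getLast?_insertBy (x l : Int × Int) (acc : List (Int × Int))
    (hp : acc.Pairwise (fun a b => a.2 ≤ b.2)) (hl : acc.getLast? = some l) :
    (PySem.List.insertBy (fun a b => decide (a.2 < b.2)) x acc).getLast? =
      some (if l.2 ≤ x.2 then x else l) := by
  induction acc with
  | nil => simp at hl
  | cons y ys ih =>
      rw [List.pairwise_cons] at hp
      simp only [PySem.List.insertBy]
      split
      · rename_i hlt
        rw [decide_eq_true_iff] at hlt
        have hy : y.2 ≤ l.2 :=
          head_le_getLast? y l ys (List.Pairwise.cons hp.1 hp.2) hl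
        have hnle : ¬ l.2 ≤ x.2 := by omega
        rw [List.getLast?_cons_cons, hl, if_neg hnle]
      · rename_i hge
        rw [decide_eq_true_iff] at hge
        rw [not_lt] at hge
        cases ys with
        | nil =>
            simp only [List.getLast?_singleton, Option.some.injEq] at hl
            subst hl
            simp [PySem.List.insertBy, List.getLast?_cons_cons, hge]
        | cons z zs =>
            rw [List.getLast?_cons_cons] at hl
            rcases List.exists_cons_of_ne_nil (insertBy_ne_nil x (z :: zs)) with ⟨w, ws, hw⟩
            rw [hw, List.getLast?_cons_cons, ← hw]
            exact ih hp.2 hl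

lemma getLast?_foldl_insertBy (t : List (Int × Int)) :
    ∀ (acc : List (Int × Int)) (l : Int × Int),
      acc.Pairwise (fun a b => a.2 ≤ b.2) → acc.getLast? = some l →
      ((t.foldl (fun acc x => PySem.List.insertBy (fun a b => decide (a.2 < b.2)) x acc) acc).getLast?) =
        some (t.foldl (fun m x => if m.2 ≤ x.2 then x else m) l) := by
  induction t with
  | nil => intro acc l _ hl; simpa using hl
  | cons x t ih =>
      intro acc l hp hl
      simp only [List.foldl_cons]
      exact ih _ _ (pairwise_insertBy x acc hp) (getLast?_insertBy x l acc hp hl)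

-- B computes the running max
lemma alt_eq_runMax (h : Int × Int) (t : List (Int × Int)) :
    tupla_con_maximo_segundo_elemento_alt (h :: t) = runMax h t := by
  unfold tupla_con_maximo_segundo_elemento_alt
  have hne : PySem.List.sorted (h :: t) (fun t => t.2) false ≠ [] := by
    rw [Ne, PySem.List.sorted_eq_nil_iff]; simp
  rw [PySem.List.pyGetD_neg_one _ _ hne]
  have hfold : (PySem.List.sorted (h :: t) (fun t => t.2) false).getLast? = some (runMax h t) := by
    rw [PySem.List.sorted_eq_foldl_insertBy]
    show ((List.foldl _ (PySem.List.insertBy (fun a b => decide (a.2 < b.2)) h []) t).getLast?) = _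
    have h1 : PySem.List.insertBy (fun a b => decide (a.2 < b.2)) h ([] : List (Int × Int)) = [h] := rfl
    rw [h1]
    exact getLast?_foldl_insertBy t [h] h (by simp) (by simp)
  have := List.getLast?_eq_some_getLast (l := PySem.List.sorted (h :: t) (fun t => t.2) false) hne
  rw [this] at hfold
  exact Option.some.inj hfold

-- one step of A's loop, with the accumulator abstracted
lemma loopA_step (h : Int × Int) (t : List (Int × Int)) (m : Nat) (F : Int)
    (hmlt : m < t.length) (h0 : 0 ≤ F) (h1 : F ≤ (m : Int))
    (h2 : PySem.List.pyGetD (h :: t) F (0, 0) = runMax h (t.take m)) :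
    0 ≤ (if (PySem.List.pyGetD (h :: t) F (0, 0)).2 ≤ (PySem.List.pyGetD (h :: t) ((m : Int) + 1) (0, 0)).2 then (m : Int) + 1 else F) ∧
    (if (PySem.List.pyGetD (h :: t) F (0, 0)).2 ≤ (PySem.List.pyGetD (h :: t) ((m : Int) + 1) (0, 0)).2 then (m : Int) + 1 else F) ≤ (m : Int) + 1 ∧
    PySem.List.pyGetD (h :: t)
      (if (PySem.List.pyGetD (h :: t) F (0, 0)).2 ≤ (PySem.List.pyGetD (h :: t) ((m : Int) + 1) (0, 0)).2 then (m : Int) + 1 else F) (0, 0) =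
      runMax h (t.take (m + 1)) := by
  have hget : PySem.List.pyGetD (h :: t) ((m : Int) + 1) (0, 0) = t[m] := by
    rw [PySem.List.pyGetD_eq_getElem _ _ (by positivity) (by simp; omega)]
    have hn : ((m : Int) + 1).toNat = m + 1 := by omega
    simp only [hn, List.getElem_cons_succ]
  have hrun : runMax h (t.take (m + 1)) =
      (if (runMax h (t.take m)).2 ≤ t[m].2 then t[m] else runMax h (t.take m)) := by
    have htake : t.take (m + 1) = t.take m ++ [t[m]] := by
      rw [List.take_add_one, List.getElem?_eq_getElem hmlt]; rfl
    rw [htake]; unfold runMax; rw [List.foldl_append]; rfl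
  rw [hget, hrun, ← h2]
  by_cases hc : (PySem.List.pyGetD (h :: t) F (0, 0)).2 ≤ t[m].2
  · simp only [if_pos hc]
    exact ⟨by positivity, le_refl _, hget⟩
  · simp only [if_neg hc]
    exact ⟨h0, by omega, by trivial⟩

-- A's index loop tracks the running max of the first m+1 elements
lemma loopA_spec (h : Int × Int) (t : List (Int × Int)) :
    ∀ (m : Nat), m ≤ t.length →
      0 ≤ ((PySem.List.pyRange 0 (m : Int) 1).foldl
        (fun aux ind =>
          if segundo_elemento (PySem.List.pyGetD (h :: t) aux (0, 0)) ≤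
              segundo_elemento (PySem.List.pyGetD (h :: t) (ind + 1) (0, 0)) then ind + 1 else aux) 0) ∧
      ((PySem.List.pyRange 0 (m : Int) 1).foldl
        (fun aux ind =>
          if segundo_elemento (PySem.List.pyGetD (h :: t) aux (0, 0)) ≤
              segundo_elemento (PySem.List.pyGetD (h :: t) (ind + 1) (0, 0)) then ind + 1 else aux) 0) ≤ (m : Int) ∧
      PySem.List.pyGetD (h :: t)
        ((PySem.List.pyRange 0 (m : Int) 1).foldl
          (fun aux ind =>
            if segundo_elemento (PySem.List.pyGetD (h :: t) aux (0, 0)) ≤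
                segundo_elemento (PySem.List.pyGetD (h :: t) (ind + 1) (0, 0)) then ind + 1 else aux) 0) (0, 0) =
        runMax h (t.take m) := by
  intro m
  induction m with
  | zero =>
      intro _
      refine ⟨le_refl 0, le_refl 0, ?_⟩
      simp [PySem.List.pyRange_one_eq_nil, PySem.List.pyGetD_zero_cons, runMax]
  | succ m ih =>
      intro hm
      have hm' : m ≤ t.length := Nat.le_of_succ_le hm
      obtain ⟨h0, h1, h2⟩ := ih hm'
      simp only [segundo_elemento] at h0 h1 h2 ⊢
      have hcast : ((m + 1 : Nat) : Int) = (m : Int) + 1 := by push_cast; ring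
      rw [hcast, PySem.List.pyRange_one_succ_right (by positivity), List.foldl_append]
      simp only [List.foldl_cons, List.foldl_nil]
      exact loopA_step h t m _ hm h0 h1 h2

-- ===== VERDICT (by name: the statement is the Claim_ definition above) =====
theorem tupla_con_maximo_segundo_elemento_spec : Claim_equal_tupla_con_maximo_segundo_elemento := by
  intro lista _ hpre
  unfold Spec_tupla_con_maximo_segundo_elemento
  rcases List.exists_cons_of_ne_nil hpre with ⟨h, t, rfl⟩
  rw [alt_eq_runMax]
  unfold tupla_con_maximo_segundo_elemento
  have hlen : PySem.List.len (h :: t) - 1 = (t.length : Int) := by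
    simp [PySem.List.len_eq]
  rw [hlen]
  have := (loopA_spec h t t.length (le_refl _)).2.2
  simpa [List.take_length, segundo_elemento] using this
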